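-- pv_equiv track=rewrite | github.com/josejrtechsp/SUAS-FINAL | tools/patch_cras_scfv_modes_v1.py | wrap_card_by_heading
-- ===== SOURCE A (Python) =====
-- def wrap_card_by_heading(text, heading, wrapper_class):
--     pos = text.find(heading)
--     if pos == -1:
--         return text, False
--     # search backward for '<div' with 'card' in same line within 1500 chars
--     back = text.rfind("<div", max(0, pos-1500), pos)
--     if back == -1:
--         return text, False
--     # ensure it's a card-ish div
--     line_end = text.find("\n", back)
--     if line_end == -1: line_end = min(len(text), back+200)
--     if "card" not in text[back:line_end]:
--         # try earlier
--         for _ in range(6):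
--             back = text.rfind("<div", max(0, back-1500), back)
--             if back == -1: break
--             line_end = text.find("\n", back)
--             if line_end == -1: line_end = min(len(text), back+200)
--             if "card" in text[back:line_end]:
--                 break
--         else:
--             return text, False
--         if back == -1 or "card" not in text[back:line_end]:
--             return text, False
--
--     # find matching </div> for this opening by counting <div and </div> tokens (best-effort)
--     i = back
--     depth = 0
--     while i < len(text):
--         nxt_div = text.find("<div", i)
--         nxt_close = text.find("</div", i)
--         if nxt_close == -1:
--             return text, False
--         if nxt_div != -1 and nxt_div < nxt_close:
--             # check self closing <div .../>
--             gt = text.find(">", nxt_div)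
--             if gt != -1 and text[gt-1] == "/":
--                 i = gt+1
--                 continue
--             depth += 1
--             i = nxt_div + 4
--         else:
--             depth -= 1
--             end_gt = text.find(">", nxt_close)
--             if end_gt == -1:
--                 return text, False
--             i = end_gt + 1
--             if depth == 0:
--                 close_end = i
--                 open_tag = f'<div className="{wrapper_class}">' + "\n"
--                 close_tag = "\n</div>\n"
--                 return text[:back] + open_tag + text[back:close_end] + close_tag + text[close_end:], True
--     return text, False
-- ===== SOURCE B (Python) =====
-- def wrap_card_by_heading(text, heading, wrapper_class):
--     pos = text.find(heading)
--     if pos == -1: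
--         return text, False
--     # up to 7 backward hops looking for a '<div' whose line mentions 'card'
--     back = pos
--     found = -1
--     for _ in range(7):
--         back = text.rfind("<div", max(0, back - 1500), back)
--         if back == -1:
--             break
--         line_end = text.find("\n", back)
--         if line_end == -1:
--             line_end = min(len(text), back + 200)
--         if "card" in text[back:line_end]:
--             found = back
--             break
--     if found == -1:
--         return text, False
--     back = found
--     # single left-to-right character scan counting div nesting
--     depth = 0
--     j = back
--     n = len(text)
--     while j < n:
--         if text.startswith("</div", j):
--             end_gt = text.find(">", j)
--             if end_gt == -1:
--                 return text, False
--             depth -= 1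
--             j = end_gt + 1
--             if depth == 0:
--                 open_tag = '<div className="' + wrapper_class + '">' + "\n"
--                 close_tag = "\n</div>\n"
--                 return text[:back] + open_tag + text[back:j] + close_tag + text[j:], True
--         elif text.startswith("<div", j):
--             gt = text.find(">", j)
--             if gt != -1 and text[gt - 1] == "/":
--                 j = gt + 1
--             else:
--                 depth += 1
--                 j += 4
--         else:
--             j += 1
--     return text, False
-- ===== Notes on version B (the rewrite author's own statement) =====
-- stated objective: alternative
-- what changed: The matching phase is a single left-to-right character scan dispatching on startswith at each position instead of A's repeated text.find calls for the next '<div'/'</div', and A's two-stage backward card search (initial check plus a for-else retry loop with two post-checks) is folded into one uniform 7-attempt hop loop.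
import Mathlib
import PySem

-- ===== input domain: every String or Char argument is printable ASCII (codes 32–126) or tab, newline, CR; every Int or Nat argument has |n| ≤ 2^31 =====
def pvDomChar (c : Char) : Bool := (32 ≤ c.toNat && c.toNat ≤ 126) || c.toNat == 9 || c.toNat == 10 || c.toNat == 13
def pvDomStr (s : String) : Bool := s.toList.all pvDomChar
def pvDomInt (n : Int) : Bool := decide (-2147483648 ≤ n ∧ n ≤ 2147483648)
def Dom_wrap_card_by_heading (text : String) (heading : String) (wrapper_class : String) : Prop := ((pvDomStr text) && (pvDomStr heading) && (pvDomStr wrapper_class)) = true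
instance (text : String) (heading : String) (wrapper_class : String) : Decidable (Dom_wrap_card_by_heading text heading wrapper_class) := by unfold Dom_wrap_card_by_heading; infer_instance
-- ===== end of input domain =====

-- B replaces A's repeated text.find-based matching loop by a single left-to-right
-- character scan (and folds the two-stage backward card search into one hop loop);
-- objective: alternative decomposition, not speed.

-- shared literal tokens and the (identical in both Pythons) wrapped-result expression
def pvOpenTok : List Char := ['<', 'd', 'i', 'v']
def pvCloseTok : List Char := ['<', '/', 'd', 'i', 'v']
def pvGtTok : List Char := ['>']
def pvNlTok : List Char := ['\n']
def pvCardTok : List Char := ['c', 'a', 'r', 'd']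

def pvWrapped (t wc : List Char) (back close_end : Int) : List Char :=
  PySem.List.slice t none (some back)
    ++ ("<div className=\"".toList ++ wc ++ "\">".toList ++ ['\n'])
    ++ PySem.List.slice t (some back) (some close_end)
    ++ ("\n</div>\n".toList)
    ++ PySem.List.slice t (some close_end) none

-- facts the loop ports cite for termination: a successful find lies at/after its
-- start and (for a nonempty needle) strictly inside the text
theorem pv_findFrom_pos (t sub : List Char) (hs : sub ≠ []) (a : Int) (ha0 : 0 ≤ a)
    (hal : a.toNat ≤ t.length) (hne : PySem.Chars.findFrom t sub a ≠ -1) :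
    a ≤ PySem.Chars.findFrom t sub a ∧ (PySem.Chars.findFrom t sub a).toNat < t.length := by
  have ha : a = ((a.toNat : Nat) : Int) := (Int.toNat_of_nonneg ha0).symm
  rw [ha] at hne ⊢
  obtain ⟨h1, h2, _⟩ := PySem.Chars.findFrom_natCast_spec t sub a.toNat hal hne
  refine ⟨h1, ?_⟩
  have hlen := h2.length_le
  have hpos : 0 < sub.length := List.length_pos_of_ne_nil hs
  rw [List.length_drop] at hlen
  omega

-- ===== PORT A =====
-- the for-else retry loop of A: returns (back, line_end, broke)
def wrapA_retry (t : List Char) (back le : Int) : Nat → Int × Int × Bool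
  | 0 => (back, le, false)
  | Nat.succ f =>
    let back' := PySem.Chars.rfindFrom t pvOpenTok (max 0 (back - 1500)) (some back)
    if back' = -1 then (back', le, true)
    else
      let le0 := PySem.Chars.findFrom t pvNlTok back'
      let le' := if le0 = -1 then min (t.length : Int) (back' + 200) else le0
      if PySem.Chars.isIn pvCardTok (PySem.List.slice t (some back') (some le')) then (back', le', true)
      else wrapA_retry t back' le' f

-- A's while loop: repeated text.find for the next '<div' / '</div' / '>'
def wrapA_loop (t wc : List Char) (back : Int) (i : Nat) (depth : Int) : String × Bool :=
  if h : i < t.length then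
    let nd := PySem.Chars.findFrom t pvOpenTok (i : Int)
    let nc := PySem.Chars.findFrom t pvCloseTok (i : Int)
    if h1 : nc = -1 then (String.ofList t, false)
    else if h2 : nd ≠ -1 ∧ nd < nc then
      let gt := PySem.Chars.findFrom t pvGtTok nd
      if h3 : gt ≠ -1 ∧ PySem.List.pyGet? t (gt - 1) = some '/' then
        wrapA_loop t wc back (gt + 1).toNat depth
      else
        wrapA_loop t wc back (nd + 4).toNat (depth + 1)
    else
      let depth' := depth - 1
      let eg := PySem.Chars.findFrom t pvGtTok nc
      if h4 : eg = -1 then (String.ofList t, false)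
      else if depth' = 0 then (String.ofList (pvWrapped t wc back (eg + 1)), true)
      else wrapA_loop t wc back (eg + 1).toNat depth'
  else (String.ofList t, false)
termination_by t.length - i
decreasing_by
  · have hnd := pv_findFrom_pos t pvOpenTok (by decide) (i : Int) (by omega) (by omega) h2.1
    have hgt := pv_findFrom_pos t pvGtTok (by decide)
      (PySem.Chars.findFrom t pvOpenTok (i : Int)) (by omega) (by omega) h3.1
    omega
  · have hnd := pv_findFrom_pos t pvOpenTok (by decide) (i : Int) (by omega) (by omega) h2.1
    omega
  · have hnc := pv_findFrom_pos t pvCloseTok (by decide) (i : Int) (by omega) (by omega) h1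
    have heg := pv_findFrom_pos t pvGtTok (by decide)
      (PySem.Chars.findFrom t pvCloseTok (i : Int)) (by omega) (by omega) h4
    omega

def wrap_card_by_heading (text : String) (heading : String) (wrapper_class : String) : String × Bool :=
  let t := text.toList
  let pos := PySem.Chars.find t heading.toList
  if pos = -1 then (text, false)
  else
    let back := PySem.Chars.rfindFrom t pvOpenTok (max 0 (pos - 1500)) (some pos)
    if back = -1 then (text, false)
    else
      let le0 := PySem.Chars.findFrom t pvNlTok back
      let le := if le0 = -1 then min (t.length : Int) (back + 200) else le0
      if PySem.Chars.isIn pvCardTok (PySem.List.slice t (some back) (some le)) then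
        wrapA_loop t wrapper_class.toList back back.toNat 0
      else
        let r := wrapA_retry t back le 6
        if r.2.2 = false then (text, false)
        else if r.1 = -1 ∨ ¬ PySem.Chars.isIn pvCardTok (PySem.List.slice t (some r.1) (some r.2.1)) then (text, false)
        else wrapA_loop t wrapper_class.toList r.1 r.1.toNat 0

-- ===== PORT B =====
-- B's single hop loop for the backward card search: returns the found index or -1
def wrapB_hop (t : List Char) (back : Int) : Nat → Int
  | 0 => -1
  | Nat.succ f =>
    let b := PySem.Chars.rfindFrom t pvOpenTok (max 0 (back - 1500)) (some back)
    if b = -1 then -1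
    else
      let le0 := PySem.Chars.findFrom t pvNlTok b
      let le := if le0 = -1 then min (t.length : Int) (b + 200) else le0
      if PySem.Chars.isIn pvCardTok (PySem.List.slice t (some b) (some le)) then b
      else wrapB_hop t b f

-- B's while loop: one character at a time, dispatch on startswith
def wrapB_loop (t wc : List Char) (back : Int) (j : Nat) (depth : Int) : String × Bool :=
  if h : j < t.length then
    if h1 : PySem.Chars.startswith (t.drop j) pvCloseTok then
      let eg := PySem.Chars.findFrom t pvGtTok (j : Int)
      if h2 : eg = -1 then (String.ofList t, false)
      else
        let depth' := depth - 1
        if depth' = 0 then (String.ofList (pvWrapped t wc back (eg + 1)), true)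
        else wrapB_loop t wc back (eg + 1).toNat depth'
    else if h3 : PySem.Chars.startswith (t.drop j) pvOpenTok then
      let gt := PySem.Chars.findFrom t pvGtTok (j : Int)
      if h4 : gt ≠ -1 ∧ PySem.List.pyGet? t (gt - 1) = some '/' then
        wrapB_loop t wc back (gt + 1).toNat depth
      else wrapB_loop t wc back (j + 4) (depth + 1)
    else wrapB_loop t wc back (j + 1) depth
  else (String.ofList t, false)
termination_by t.length - j
decreasing_by
  · have heg := pv_findFrom_pos t pvGtTok (by decide) (j : Int) (by omega) (by omega) h2
    omega
  · have hgt := pv_findFrom_pos t pvGtTok (by decide) (j : Int) (by omega) (by omega) h4.1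
    omega
  · omega
  · omega

def wrap_card_by_heading_alt (text : String) (heading : String) (wrapper_class : String) : String × Bool :=
  let t := text.toList
  let pos := PySem.Chars.find t heading.toList
  if pos = -1 then (text, false)
  else
    let found := wrapB_hop t pos 7
    if found = -1 then (text, false)
    else wrapB_loop t wrapper_class.toList found found.toNat 0

-- ===== PRECONDITION & SPEC =====
def Spec_wrap_card_by_heading (text : String) (heading : String) (wrapper_class : String) (out : String × Bool) : Prop := out = wrap_card_by_heading_alt text heading wrapper_class
instance (text : String) (heading : String) (wrapper_class : String) (out : String × Bool) : Decidable (Spec_wrap_card_by_heading text heading wrapper_class out) := by unfold Spec_wrap_card_by_heading; infer_instance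

-- ===== CLAIM (what is proved, stated in full; the proofs are below) =====
def Claim_equal_wrap_card_by_heading : Prop := ∀ (text : String) (heading : String) (wrapper_class : String), Dom_wrap_card_by_heading text heading wrapper_class → Spec_wrap_card_by_heading text heading wrapper_class (wrap_card_by_heading text heading wrapper_class)

-- ===== LEMMAS AND PROOFS =====

-- find on a cons, when the needle does not match at the head
theorem pv_find_cons (c : Char) (rest sub : List Char) (h : ¬ sub <+: (c :: rest)) :
    PySem.Chars.find (c :: rest) sub =
      if PySem.Chars.find rest sub = -1 then -1 else PySem.Chars.find rest sub + 1 := by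
  by_cases hr : PySem.Chars.find rest sub = -1
  · rw [if_pos hr, PySem.Chars.find_eq_neg_one_iff]
    rw [PySem.Chars.find_eq_neg_one_iff] at hr
    rw [List.infix_cons_iff]
    tauto
  · rw [if_neg hr]
    have hr0 : 0 ≤ PySem.Chars.find rest sub := by
      have := PySem.Chars.neg_one_le_find rest sub
      omega
    obtain ⟨hp2, hmin2⟩ := PySem.Chars.find_spec hr0
    have hinf : sub <:+: (c :: rest) := by
      rw [List.infix_cons_iff]
      exact Or.inr (hp2.isInfix.trans (List.drop_suffix _ _).isInfix)
    have h10 : 0 ≤ PySem.Chars.find (c :: rest) sub := (PySem.Chars.find_nonneg_iff _ _).mpr hinf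
    obtain ⟨hp1, hmin1⟩ := PySem.Chars.find_spec h10
    have hne0 : (PySem.Chars.find (c :: rest) sub).toNat ≠ 0 := by
      intro h0
      rw [h0] at hp1
      exact h (by simpa using hp1)
    have hA : ¬ ((PySem.Chars.find rest sub).toNat + 1 < (PySem.Chars.find (c :: rest) sub).toNat) := by
      intro hlt
      exact hmin1 _ hlt (by simpa [List.drop_succ_cons] using hp2)
    have hB : ¬ ((PySem.Chars.find (c :: rest) sub).toNat - 1 < (PySem.Chars.find rest sub).toNat) := by
      intro hlt
      apply hmin2 _ hlt
      have : (PySem.Chars.find (c :: rest) sub).toNat = ((PySem.Chars.find (c :: rest) sub).toNat - 1) + 1 := by omega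
      rw [this, List.drop_succ_cons] at hp1
      exact hp1
    omega


-- a successful find at/after k, with no match before k+1, steps to k+1
theorem pv_findFrom_step (t sub : List Char) (k : Nat) (hk : k < t.length)
    (h : ¬ sub <+: t.drop k) :
    PySem.Chars.findFrom t sub (k : Int) = PySem.Chars.findFrom t sub ((k + 1 : Nat) : Int) := by
  rw [PySem.Chars.findFrom_natCast t sub k (le_of_lt hk), PySem.Chars.findFrom_natCast t sub (k + 1) hk]
  have hc : t.drop k = t[k] :: t.drop (k + 1) := List.drop_eq_getElem_cons hk
  rw [hc] at h
  rw [hc, pv_find_cons _ _ _ h]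
  have hge := PySem.Chars.neg_one_le_find (t.drop (k + 1)) sub
  split_ifs with h1 h2 h3 <;> push_cast <;> omega


-- a match at the start position is found there
theorem pv_findFrom_self (t sub : List Char) (k : Nat) (hk : k ≤ t.length)
    (h : sub <+: t.drop k) : PySem.Chars.findFrom t sub (k : Int) = (k : Int) := by
  rw [PySem.Chars.findFrom_natCast t sub k hk]
  have h1 : 0 ≤ PySem.Chars.find (t.drop k) sub :=
    (PySem.Chars.find_nonneg_iff _ _).mpr h.isInfix
  obtain ⟨_, hmin⟩ := PySem.Chars.find_spec h1
  have h0 : PySem.Chars.find (t.drop k) sub = 0 := by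
    by_contra hne
    exact hmin 0 (by omega) (by simpa using h)
  simp [h0]


-- the found position carries a match of the needle
theorem pv_findFrom_prefix (t sub : List Char) (k : Nat) (hk : k ≤ t.length)
    (hne : PySem.Chars.findFrom t sub (k : Int) ≠ -1) :
    sub <+: t.drop (PySem.Chars.findFrom t sub (k : Int)).toNat :=
  (PySem.Chars.findFrom_natCast_spec t sub k hk hne).2.1


-- with no "</div" at or after i, B's scan can only fall off the end
theorem pv_noclose (t wc : List Char) (back : Int) (i : Nat)
    (hno : ¬ pvCloseTok <:+: t.drop i) :
    ∀ (n j : Nat) (d : Int), i ≤ j → t.length - j ≤ n →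
      wrapB_loop t wc back j d = (String.ofList t, false) := by
  intro n
  induction n with
  | zero =>
    intro j d hij hnj
    rw [wrapB_loop, dif_neg (by omega : ¬ j < t.length)]
  | succ n ih =>
    intro j d hij hnj
    rw [wrapB_loop]
    by_cases hj : j < t.length
    · rw [dif_pos hj]
      have hcl : ¬ PySem.Chars.startswith (t.drop j) pvCloseTok = true := by
        rw [PySem.Chars.startswith_iff]
        intro hp
        apply hno
        have hdd : t.drop j = (t.drop i).drop (j - i) := by
          rw [List.drop_drop]; congr 1; omega
        rw [hdd] at hp
        exact hp.isInfix.trans (List.drop_suffix _ _).isInfix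
      rw [dif_neg hcl]
      by_cases hop : PySem.Chars.startswith (t.drop j) pvOpenTok = true
      · rw [dif_pos hop]
        dsimp only
        split_ifs with h4
        · have hgt := pv_findFrom_pos t pvGtTok (by decide) (j : Int) (by omega) (by omega) h4.1
          apply ih <;> omega
        · apply ih <;> omega
      · rw [dif_neg hop]
        apply ih <;> omega
    · rw [dif_neg hj]

-- B's hop loop computes exactly what A's retry loop plus A's two post-checks select
theorem pv_hop_retry (t : List Char) : ∀ (f : Nat) (b le : Int),
    wrapB_hop t b f =
      (if (wrapA_retry t b le f).2.2 = true ∧ ¬ (wrapA_retry t b le f).1 = -1 ∧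
          PySem.Chars.isIn pvCardTok
            (PySem.List.slice t (some (wrapA_retry t b le f).1) (some (wrapA_retry t b le f).2.1)) = true
        then (wrapA_retry t b le f).1 else -1) := by
  intro f
  induction f with
  | zero =>
    intro b le
    simp [wrapB_hop, wrapA_retry]
  | succ f ih =>
    intro b le
    simp only [wrapB_hop, wrapA_retry]
    set b' := PySem.Chars.rfindFrom t pvOpenTok (max 0 (b - 1500)) (some b) with hb'
    by_cases hb : b' = -1
    · simp [hb]
    · rw [if_neg hb, if_neg hb]
      set le' := (if PySem.Chars.findFrom t pvNlTok b' = -1 then min (t.length : Int) (b' + 200)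
        else PySem.Chars.findFrom t pvNlTok b') with hle'
      by_cases hcard : PySem.Chars.isIn pvCardTok (PySem.List.slice t (some b') (some le')) = true
      · simp [hcard, hb]
      · rw [if_neg hcard, if_neg hcard]
        exact ih _ _

-- the two matching loops agree
theorem pv_loop_eq (t wc : List Char) (back : Int) :
    ∀ (n i : Nat) (d : Int), t.length - i ≤ n →
      wrapA_loop t wc back i d = wrapB_loop t wc back i d := by
  intro n
  induction n with
  | zero =>
    intro i d hn
    rw [wrapA_loop, wrapB_loop, dif_neg (by omega : ¬ i < t.length),
      dif_neg (by omega : ¬ i < t.length)]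
  | succ n ih =>
    intro i d hn
    by_cases hi : i < t.length
    swap
    · rw [wrapA_loop, wrapB_loop, dif_neg hi, dif_neg hi]
    by_cases hc : pvCloseTok <+: t.drop i
    · -- a "</div" match at i: both take the close branch
      have hnc : PySem.Chars.findFrom t pvCloseTok (i : Int) = (i : Int) :=
        pv_findFrom_self t pvCloseTok i (le_of_lt hi) hc
      have hsw : PySem.Chars.startswith (t.drop i) pvCloseTok = true :=
        (PySem.Chars.startswith_iff _ _).mpr hc
      rw [wrapA_loop, wrapB_loop, dif_pos hi, dif_pos hi, dif_pos hsw]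
      dsimp only
      rw [hnc]
      rw [dif_neg (by omega : ¬ ((i : Int) = -1))]
      have hguard : ¬ (PySem.Chars.findFrom t pvOpenTok (i : Int) ≠ -1 ∧
          PySem.Chars.findFrom t pvOpenTok (i : Int) < (i : Int)) := by
        rintro ⟨h1, h2⟩
        have := (pv_findFrom_pos t pvOpenTok (by decide) (i : Int) (by omega) (by omega) h1).1
        omega
      rw [dif_neg hguard]
      by_cases heg : PySem.Chars.findFrom t pvGtTok (i : Int) = -1
      · rw [dif_pos heg, dif_pos heg]
      · rw [dif_neg heg, dif_neg heg]
        by_cases hd : d - 1 = 0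
        · rw [if_pos hd, if_pos hd]
        · rw [if_neg hd, if_neg hd]
          have heg' := pv_findFrom_pos t pvGtTok (by decide) (i : Int) (by omega) (by omega) heg
          exact ih _ _ (by omega)
    · have hswc : ¬ PySem.Chars.startswith (t.drop i) pvCloseTok = true := by
        rw [PySem.Chars.startswith_iff]; exact hc
      by_cases ho : pvOpenTok <+: t.drop i
      · -- a "<div" match at i
        have hnd : PySem.Chars.findFrom t pvOpenTok (i : Int) = (i : Int) :=
          pv_findFrom_self t pvOpenTok i (le_of_lt hi) ho
        have hswo : PySem.Chars.startswith (t.drop i) pvOpenTok = true :=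
          (PySem.Chars.startswith_iff _ _).mpr ho
        by_cases hnc : PySem.Chars.findFrom t pvCloseTok (i : Int) = -1
        · -- no "</div" anywhere at/after i: A exits now, B scans off the end
          rw [wrapA_loop, dif_pos hi]
          dsimp only
          rw [dif_pos hnc]
          have hnoinf : ¬ pvCloseTok <:+: t.drop i := by
            rw [← PySem.Chars.findFrom_natCast_eq_neg_one_iff t pvCloseTok i (le_of_lt hi)]
            exact hnc
          exact (pv_noclose t wc back i hnoinf (n + 1) i d le_rfl hn).symm
        · -- both take the open branch
          rw [wrapA_loop, wrapB_loop, dif_pos hi, dif_pos hi, dif_neg hswc, dif_pos hswo]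
          dsimp only
          rw [dif_neg hnc]
          have hncge := pv_findFrom_pos t pvCloseTok (by decide) (i : Int) (by omega) (by omega) hnc
          have hncnei : PySem.Chars.findFrom t pvCloseTok (i : Int) ≠ (i : Int) := by
            intro heq
            apply hc
            have hp := pv_findFrom_prefix t pvCloseTok i (le_of_lt hi) hnc
            rw [heq] at hp
            simpa using hp
          have hguard : (PySem.Chars.findFrom t pvOpenTok (i : Int) ≠ -1 ∧
              PySem.Chars.findFrom t pvOpenTok (i : Int) <
                PySem.Chars.findFrom t pvCloseTok (i : Int)) := by
            rw [hnd]
            constructor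
            · omega
            · omega
          rw [dif_pos hguard]
          rw [hnd]
          by_cases hgt : (PySem.Chars.findFrom t pvGtTok (i : Int) ≠ -1 ∧
              PySem.List.pyGet? t (PySem.Chars.findFrom t pvGtTok (i : Int) - 1) = some '/')
          · rw [dif_pos hgt, dif_pos hgt]
            have hgt' := pv_findFrom_pos t pvGtTok (by decide) (i : Int) (by omega) (by omega) hgt.1
            exact ih _ _ (by omega)
          · rw [dif_neg hgt, dif_neg hgt]
            rw [(by omega : ((i : Int) + 4).toNat = i + 4)]
            exact ih _ _ (by omega)
      · -- no tag starts at i: B steps one char, A's finds are unchanged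
        have hswo : ¬ PySem.Chars.startswith (t.drop i) pvOpenTok = true := by
          rw [PySem.Chars.startswith_iff]; exact ho
        have hB : wrapB_loop t wc back i d = wrapB_loop t wc back (i + 1) d := by
          rw [wrapB_loop, dif_pos hi, dif_neg hswc, dif_neg hswo]
        rw [hB, ← ih (i + 1) d (by omega)]
        by_cases hi1 : i + 1 < t.length
        · conv_rhs => rw [wrapA_loop]
          conv_lhs => rw [wrapA_loop]
          rw [dif_pos hi, dif_pos hi1]
          dsimp only
          rw [pv_findFrom_step t pvOpenTok i hi ho, pv_findFrom_step t pvCloseTok i hi hc]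
        · have hnc : PySem.Chars.findFrom t pvCloseTok (i : Int) = -1 := by
            rw [PySem.Chars.findFrom_natCast_eq_neg_one_iff t pvCloseTok i (le_of_lt hi)]
            intro hinf
            have h5 := hinf.length_le
            rw [List.length_drop] at h5
            simp [pvCloseTok] at h5
            omega
          conv_rhs => rw [wrapA_loop]
          conv_lhs => rw [wrapA_loop]
          rw [dif_pos hi, dif_neg hi1]
          dsimp only
          rw [dif_pos hnc]

-- ===== VERDICT (by name: the statement is the Claim_ definition above) =====
theorem wrap_card_by_heading_spec : Claim_equal_wrap_card_by_heading := by
  intro text heading wrapper_class _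
  unfold Spec_wrap_card_by_heading
  rw [wrap_card_by_heading, wrap_card_by_heading_alt]
  dsimp only
  set t := text.toList with ht
  set pos := PySem.Chars.find t heading.toList with hpos
  by_cases h0 : pos = -1
  · rw [if_pos h0, if_pos h0]
  · rw [if_neg h0, if_neg h0]
    have hstep : wrapB_hop t pos 7 =
        (if PySem.Chars.rfindFrom t pvOpenTok (max 0 (pos - 1500)) (some pos) = -1 then -1
         else
           if PySem.Chars.isIn pvCardTok (PySem.List.slice t
               (some (PySem.Chars.rfindFrom t pvOpenTok (max 0 (pos - 1500)) (some pos)))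
               (some (if PySem.Chars.findFrom t pvNlTok
                          (PySem.Chars.rfindFrom t pvOpenTok (max 0 (pos - 1500)) (some pos)) = -1
                      then min (t.length : Int)
                          (PySem.Chars.rfindFrom t pvOpenTok (max 0 (pos - 1500)) (some pos) + 200)
                      else PySem.Chars.findFrom t pvNlTok
                          (PySem.Chars.rfindFrom t pvOpenTok (max 0 (pos - 1500)) (some pos))))) = true
           then PySem.Chars.rfindFrom t pvOpenTok (max 0 (pos - 1500)) (some pos)
           else wrapB_hop t (PySem.Chars.rfindFrom t pvOpenTok (max 0 (pos - 1500)) (some pos)) 6) := rfl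
    rw [hstep]
    set back := PySem.Chars.rfindFrom t pvOpenTok (max 0 (pos - 1500)) (some pos) with hback
    by_cases hb : back = -1
    · rw [if_pos hb, if_pos hb]
      rw [if_pos rfl]
    · rw [if_neg hb, if_neg hb]
      set le := (if PySem.Chars.findFrom t pvNlTok back = -1
                 then min (t.length : Int) (back + 200)
                 else PySem.Chars.findFrom t pvNlTok back) with hle
      by_cases hcard : PySem.Chars.isIn pvCardTok (PySem.List.slice t (some back) (some le)) = true
      · rw [if_pos hcard, if_pos hcard, if_neg hb]
        exact pv_loop_eq t wrapper_class.toList back t.length back.toNat 0 (by omega)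
      · rw [if_neg hcard, if_neg hcard]
        rw [pv_hop_retry t 6 back le]
        rcases hr : wrapA_retry t back le 6 with ⟨b2, le2, br⟩
        dsimp only
        by_cases hbr : br = false
        · rw [if_pos hbr]
          have hfound : (if br = true ∧ ¬b2 = -1 ∧
              PySem.Chars.isIn pvCardTok (PySem.List.slice t (some b2) (some le2)) = true
              then b2 else -1) = -1 := by simp [hbr]
          rw [hfound, if_pos rfl]
        · rw [if_neg hbr]
          have hbr' : br = true := by revert hbr; cases br <;> simp
          by_cases hpost : b2 = -1 ∨ ¬ PySem.Chars.isIn pvCardTok (PySem.List.slice t (some b2) (some le2)) = true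
          · rw [if_pos hpost]
            have hfound : (if br = true ∧ ¬b2 = -1 ∧
                PySem.Chars.isIn pvCardTok (PySem.List.slice t (some b2) (some le2)) = true
                then b2 else -1) = -1 := by
              rcases hpost with h | h <;> simp [h]
            rw [hfound, if_pos rfl]
          · rw [if_neg hpost]
            push Not at hpost
            have hfound : (if br = true ∧ ¬b2 = -1 ∧
                PySem.Chars.isIn pvCardTok (PySem.List.slice t (some b2) (some le2)) = true
                then b2 else -1) = b2 := if_pos ⟨hbr', hpost.1, hpost.2⟩
            rw [hfound, if_neg hpost.1]
            exact pv_loop_eq t wrapper_class.toList b2 t.length b2.toNat 0 (by omega)
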